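-- pv_equiv track=rewrite | github.com/Reprieven/AOIS | Lab3/TableMethod.py | get_minimal_knf
-- ===== SOURCE A (Python) =====
-- from typing import List, Tuple
--
-- def gray_code_to_list(num: int, bits: int) -> List[int]:
--     """Возвращает биты числа в коде Грея заданной длины."""
--     gray = num ^ (num >> 1)
--     return [(gray >> i) & 1 for i in range(bits - 1, -1, -1)]
--
-- def analyze_kmap_group(group: List[Tuple[int, int]], row_vars: str = 'ab', col_vars: str = 'cd') -> str:
--     (r1, c1), (r2, c2) = group
--     rows = sorted({r % 4 for r in range(r1, r2 + 1)})
--     cols = sorted({c % 4 for c in range(c1, c2 + 1)})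
--
--     term = []
--     for i, var in enumerate(row_vars):
--         bits = [gray_code_to_list(r, len(row_vars))[i] for r in rows]
--         if all(b == bits[0] for b in bits):
--             term.append(f"{'' if bits[0] else '¬'}{var}")
--     for i, var in enumerate(col_vars):
--         bits = [gray_code_to_list(c, len(col_vars))[i] for c in cols]
--         if all(b == bits[0] for b in bits):
--             term.append(f"{'' if bits[0] else '¬'}{var}")
--
--     return ''.join(term)
--
-- def get_minimal_knf(groups: List[List[Tuple[int, int]]], row_vars: str = 'ab', col_vars: str = 'cd') -> str:
--     terms = [analyze_kmap_group(group, row_vars, col_vars) for group in groups]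
--
--     knf_terms = []
--     for term in terms:
--         literals = []
--         i = 0
--         while i < len(term):
--             if term[i] == '¬':
--                 literals.append(term[i] + term[i+1])
--                 i += 2
--             else:
--                 literals.append(term[i])
--                 i += 1
--         inverted_literals = [lit[1:] if '¬' in lit else f'¬{lit}' for lit in literals]
--         knf_terms.append(f"({'∨'.join(inverted_literals)})")
--
--     return ''.join(knf_terms) if len(knf_terms) > 1 else knf_terms[0]
-- ===== SOURCE B (Python) =====
-- # B: carry literals as structured (bit, var) pairs instead of formatting to a
-- # string and re-parsing it character by character; clauses are formatted once.
-- from typing import List, Tuple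
--
-- def _gray_bit(num: int, i: int) -> int:
--     g = num ^ (num >> 1)
--     return (g >> i) & 1
--
-- def _group_literals(group: List[Tuple[int, int]], row_vars: str, col_vars: str) -> List[Tuple[int, str]]:
--     (r1, c1), (r2, c2) = group
--     rows = sorted({r % 4 for r in range(r1, r2 + 1)})
--     cols = sorted({c % 4 for c in range(c1, c2 + 1)})
--     lits = []
--     for vals, vars_ in ((rows, row_vars), (cols, col_vars)):
--         n = len(vars_)
--         for i, v in enumerate(vars_):
--             bits = {_gray_bit(x, n - 1 - i) for x in vals}
--             if len(bits) == 1: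
--                 (b,) = bits
--                 lits.append((b, v))
--     return lits
--
-- def get_minimal_knf(groups: List[List[Tuple[int, int]]], row_vars: str = 'ab', col_vars: str = 'cd') -> str:
--     clauses = []
--     for group in groups:
--         lits = _group_literals(group, row_vars, col_vars)
--         clauses.append('(' + '∨'.join(('¬' + v if b else v) for b, v in lits) + ')')
--     return ''.join(clauses)
-- ===== Notes on version B (the rewrite author's own statement) =====
-- stated objective: simpler
-- what changed: B keeps each group's literals as structured (bit, var) pairs (detected via a one-element set of gray-code bits) and formats every CNF clause once, eliminating A's build-a-string/re-parse-character-by-character/invert pipeline and the singular join special case.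
import Mathlib
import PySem

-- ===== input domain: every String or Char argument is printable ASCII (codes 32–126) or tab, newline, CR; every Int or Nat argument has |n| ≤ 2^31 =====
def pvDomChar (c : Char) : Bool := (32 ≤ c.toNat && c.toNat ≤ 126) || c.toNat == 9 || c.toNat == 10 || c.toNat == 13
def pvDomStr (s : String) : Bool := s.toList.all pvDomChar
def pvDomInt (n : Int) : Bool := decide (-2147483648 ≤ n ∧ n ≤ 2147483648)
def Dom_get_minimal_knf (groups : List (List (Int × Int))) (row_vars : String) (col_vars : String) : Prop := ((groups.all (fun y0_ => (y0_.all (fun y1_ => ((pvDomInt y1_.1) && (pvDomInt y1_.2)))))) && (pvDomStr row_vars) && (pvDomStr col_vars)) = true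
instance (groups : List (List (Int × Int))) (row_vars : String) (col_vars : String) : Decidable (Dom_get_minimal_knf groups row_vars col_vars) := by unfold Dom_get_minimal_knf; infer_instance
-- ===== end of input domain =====

-- B replaces A's format-then-reparse pipeline by structured (bit, var) literal pairs
-- formatted once per clause (objective: simpler data flow, same cost).

-- ===== PORT A =====

-- gray_code_to_list(num, bits): bits of num ^ (num >> 1), most significant first
def grayCodeToList (num : Int) (bits : Int) : List Int :=
  let gray := PySem.Int.bxor num (num >>> (1 : Nat))
  (PySem.List.pyRange (bits - 1) (-1) (-1)).map
    (fun i => PySem.Int.band (gray >>> i.toNat) 1)  -- i runs bits-1 … 0, so i.toNat is exact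

-- one of the two identical 'for i, var in enumerate(vars)' loops of analyze_kmap_group;
-- term is the Python list of literal strings (joined by '' at the end)
def analyzeLoopA (vals : List Int) (vars : List Char) : List (List Char) :=
  (PySem.List.enumerate vars 0).foldl (fun term iv =>
    let bits := vals.map (fun r => PySem.List.pyGetD (grayCodeToList r (vars.length : Int)) iv.1 0)
    if bits.all (fun b => b == PySem.List.pyGetD bits 0 0)
    then term ++ [(if PySem.List.pyGetD bits 0 0 ≠ 0 then [] else ['¬']) ++ [iv.2]]
    else term) []

def analyze_kmap_group (group : List (Int × Int)) (row_vars col_vars : List Char) : List Char :=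
  match group with
  | [(r1, c1), (r2, c2)] =>
    let rows := PySem.List.sorted
      (PySem.Set.ofList ((PySem.List.pyRange r1 (r2 + 1) 1).map (fun r => PySem.Int.mod r 4)))
      (fun x => x) false
    let cols := PySem.List.sorted
      (PySem.Set.ofList ((PySem.List.pyRange c1 (c2 + 1) 1).map (fun c => PySem.Int.mod c 4)))
      (fun x => x) false
    (analyzeLoopA rows row_vars ++ analyzeLoopA cols col_vars).flatten  -- ''.join(term)
  | _ => []  -- Python raises ValueError on unpacking; excluded by Pre_

-- the character-by-character 'while i < len(term)' parse loop
def parseLits : List Char → List (List Char)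
  | [] => []
  | [c] => if c = '¬' then [] else [[c]]  -- the '¬' branch is Python's term[i+1] IndexError, unreachable on Dom inputs (variable chars are ASCII, '¬' is not)
  | c :: d :: rest =>
    if c = '¬' then ['¬', d] :: parseLits rest
    else [c] :: parseLits (d :: rest)

-- lit[1:] if '¬' in lit else '¬' + lit
def invertLit (lit : List Char) : List Char :=
  if lit.contains '¬' then lit.drop 1 else '¬' :: lit

def get_minimal_knf (groups : List (List (Int × Int))) (row_vars : String) (col_vars : String) : String :=
  let terms := groups.map (fun g => analyze_kmap_group g row_vars.toList col_vars.toList)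
  let knf_terms := terms.foldl (fun acc term =>
    acc ++ [('(' :: List.intercalate ['∨'] ((parseLits term).map invertLit)) ++ [')']]) []
  String.ofList (if knf_terms.length > 1 then knf_terms.flatten
             else PySem.List.pyGetD knf_terms 0 [])  -- knf_terms[0]; IndexError on empty groups, excluded by Pre_

-- ===== PORT B =====

-- _gray_bit(num, i)
def grayBitB (num : Int) (i : Nat) : Int :=
  PySem.Int.band ((PySem.Int.bxor num (num >>> (1 : Nat))) >>> i) 1

-- the inner 'for i, v in enumerate(vars_)' loop of _group_literals
def litLoopB (vals : List Int) (vars : List Char) : List (Int × Char) :=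
  (PySem.List.enumerate vars 0).foldl (fun lits iv =>
    let bits := PySem.Set.ofList (vals.map (fun x => grayBitB x ((vars.length : Int) - 1 - iv.1).toNat))
    if bits.length == 1
    then lits ++ [(bits.headD 0, iv.2)]  -- '(b,) = bits': the unique element of a singleton set (order-independent)
    else lits) []

def groupLiterals (group : List (Int × Int)) (row_vars col_vars : List Char) : List (Int × Char) :=
  match group with
  | [(r1, c1), (r2, c2)] =>
    let rows := PySem.List.sorted
      (PySem.Set.ofList ((PySem.List.pyRange r1 (r2 + 1) 1).map (fun r => PySem.Int.mod r 4)))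
      (fun x => x) false
    let cols := PySem.List.sorted
      (PySem.Set.ofList ((PySem.List.pyRange c1 (c2 + 1) 1).map (fun c => PySem.Int.mod c 4)))
      (fun x => x) false
    litLoopB rows row_vars ++ litLoopB cols col_vars
  | _ => []  -- Python raises ValueError on unpacking; excluded by Pre_

def get_minimal_knf_alt (groups : List (List (Int × Int))) (row_vars : String) (col_vars : String) : String :=
  let clauses := groups.foldl (fun acc g =>
    acc ++ [('(' :: List.intercalate ['∨']
      ((groupLiterals g row_vars.toList col_vars.toList).map
        (fun bv => if bv.1 ≠ 0 then '¬' :: [bv.2] else [bv.2]))) ++ [')']]) []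
  String.ofList clauses.flatten

-- ===== PRECONDITION & SPEC =====

-- Pre_ excludes exactly the inputs where A raises: empty groups (knf_terms[0] IndexError),
-- a group without exactly two pairs (unpacking ValueError), and an empty row/col range met
-- by a nonempty variable string (bits[0] IndexError).
def Pre_get_minimal_knf (groups : List (List (Int × Int))) (row_vars : String) (col_vars : String) : Prop :=
  groups ≠ [] ∧ ∀ g ∈ groups, g.length = 2 ∧
    ((g.getD 0 (0, 0)).1 ≤ (g.getD 1 (0, 0)).1 ∨ row_vars = "") ∧
    ((g.getD 0 (0, 0)).2 ≤ (g.getD 1 (0, 0)).2 ∨ col_vars = "")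
instance (groups : List (List (Int × Int))) (row_vars : String) (col_vars : String) : Decidable (Pre_get_minimal_knf groups row_vars col_vars) := by unfold Pre_get_minimal_knf; infer_instance

def pvWitness_get_minimal_knf : (List (List (Int × Int))) × String × String := ([[(0, 0), (1, 1)]], "ab", "cd")

def Spec_get_minimal_knf (groups : List (List (Int × Int))) (row_vars : String) (col_vars : String) (out : String) : Prop := out = get_minimal_knf_alt groups row_vars col_vars
instance (groups : List (List (Int × Int))) (row_vars : String) (col_vars : String) (out : String) : Decidable (Spec_get_minimal_knf groups row_vars col_vars out) := by unfold Spec_get_minimal_knf; infer_instance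

-- ===== CLAIM (what is proved, stated in full; the proofs are below) =====
def Claim_equal_get_minimal_knf : Prop := ∀ (groups : List (List (Int × Int))) (row_vars : String) (col_vars : String), Dom_get_minimal_knf groups row_vars col_vars → Pre_get_minimal_knf groups row_vars col_vars → Spec_get_minimal_knf groups row_vars col_vars (get_minimal_knf groups row_vars col_vars)

-- ===== LEMMAS AND PROOFS =====

-- the chunk A appends to term for a kept (bit, var) pair
def litChars (bv : Int × Char) : List Char :=
  (if bv.1 ≠ 0 then [] else ['¬']) ++ [bv.2]


-- A's indexing into the full gray-code list equals B's single-bit computation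
lemma grayGet_eq (r n i : Int) (h0 : 0 ≤ i) (h1 : i < n) :
    PySem.List.pyGetD (grayCodeToList r n) i 0 = grayBitB r (n - 1 - i).toNat := by
  rw [grayCodeToList, PySem.List.pyRange_neg_one, List.map_map]
  rw [PySem.List.pyGetD_eq_getElem _ _ h0 (by simpa using (by omega : i < ((n - 1) - (-1)).toNat))]
  simp only [List.getElem_map, List.getElem_range, Function.comp]
  rw [grayBitB, Int.shiftRight_natCast_right]
  congr 2
  omega

-- folding Set.add leaves the accumulator as a prefix
lemma foldl_add_prefix (t : List Int) (s : List Int) :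
    ∃ u, t.foldl PySem.Set.add s = s ++ u := by
  induction t generalizing s with
  | nil => exact ⟨[], by simp⟩
  | cons y t ih =>
    simp only [List.foldl_cons]
    rcases ih (PySem.Set.add s y) with ⟨u, hu⟩
    by_cases h : y ∈ s
    · have hadd : PySem.Set.add s y = s := by simp [PySem.Set.add, h]
      rw [hadd] at hu ⊢
      exact ⟨u, hu⟩
    · have hadd : PySem.Set.add s y = s ++ [y] := by simp [PySem.Set.add, h]
      rw [hadd] at hu ⊢
      exact ⟨y :: u, by simpa using hu⟩

-- folding Set.add over t on [x] stays [x] iff every element of t is x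
lemma foldl_add_eq_self_iff (t : List Int) (x : Int) :
    (t.foldl PySem.Set.add [x] = [x]) ↔ (∀ y ∈ t, y = x) := by
  induction t with
  | nil => simp
  | cons y t ih =>
    simp only [List.foldl_cons, List.forall_mem_cons]
    by_cases h : y = x
    · subst h
      rw [show PySem.Set.add [y] y = [y] by simp [PySem.Set.add]]
      simp [ih]
    · rw [show PySem.Set.add [x] y = [x, y] by simp [PySem.Set.add, h]]
      rcases foldl_add_prefix t [x, y] with ⟨u, hu⟩
      constructor
      · intro he
        rw [hu] at he
        simp at he
      · rintro ⟨hyx, -⟩; exact absurd hyx h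

-- B's len(set(bits)) == 1 is A's 'all bits equal the first'
lemma set_singleton_iff (x : Int) (t : List Int) :
    ((PySem.Set.ofList (x :: t)).length == 1) = (x :: t).all (fun b => b == x) := by
  rw [PySem.Set.ofList_eq_foldl]
  simp only [List.foldl_cons, List.all_cons, beq_self_eq_true, Bool.true_and]
  rw [show PySem.Set.add ([] : List Int) x = [x] by simp [PySem.Set.add]]
  by_cases h : ∀ y ∈ t, y = x
  · rw [(foldl_add_eq_self_iff t x).mpr h]
    simpa [List.all_eq_true] using h
  · have hne : t.foldl PySem.Set.add [x] ≠ [x] :=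
      fun he => h ((foldl_add_eq_self_iff t x).mp he)
    rcases foldl_add_prefix t [x] with ⟨u, hu⟩
    have hlen : (t.foldl PySem.Set.add [x]).length ≠ 1 := by
      rw [hu]
      intro hl
      simp only [List.length_append, List.length_cons, List.length_nil] at hl
      have : u = [] := by
        rw [List.length_eq_zero_iff.symm] at *
        omega
      exact hne (by rw [hu, this]; simp)
    have hall : t.all (fun b => b == x) = false := by
      apply Bool.eq_false_iff.mpr
      intro hall
      exact h (fun y hy => by simpa using List.all_eq_true.mp hall y hy)
    rw [hall]
    exact beq_eq_false_iff_ne.mpr hlen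

-- the unique element B unpacks from the singleton set is the first bit
lemma set_headD (x : Int) (t : List Int) :
    (PySem.Set.ofList (x :: t)).headD 0 = x := by
  rw [PySem.Set.ofList_eq_foldl]
  simp only [List.foldl_cons]
  rw [show PySem.Set.add ([] : List Int) x = [x] by simp [PySem.Set.add]]
  rcases foldl_add_prefix t [x] with ⟨u, hu⟩
  rw [hu]
  simp

-- the two enumerate loops keep the same variables with the same common bit
lemma side_eq (vals : List Int) (vars : List Char) (h : vals ≠ [] ∨ vars = []) :
    analyzeLoopA vals vars = (litLoopB vals vars).map litChars := by
  rcases h with h | h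
  · rcases List.exists_cons_of_ne_nil h with ⟨x, vt, rfl⟩
    rw [analyzeLoopA, litLoopB]
    rw [PySem.List.foldl_append_if
        (fun iv : Int × Char =>
          ((x :: vt).map (fun r => PySem.List.pyGetD (grayCodeToList r (vars.length : Int)) iv.1 0)).all
            (fun b => b == PySem.List.pyGetD ((x :: vt).map (fun r => PySem.List.pyGetD (grayCodeToList r (vars.length : Int)) iv.1 0)) 0 0))
        (fun iv : Int × Char =>
          (if PySem.List.pyGetD ((x :: vt).map (fun r => PySem.List.pyGetD (grayCodeToList r (vars.length : Int)) iv.1 0)) 0 0 ≠ 0 then [] else ['¬']) ++ [iv.2])]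
    rw [PySem.List.foldl_append_if
        (fun iv : Int × Char =>
          (PySem.Set.ofList ((x :: vt).map (fun y => grayBitB y ((vars.length : Int) - 1 - iv.1).toNat))).length == 1)
        (fun iv : Int × Char =>
          ((PySem.Set.ofList ((x :: vt).map (fun y => grayBitB y ((vars.length : Int) - 1 - iv.1).toNat))).headD 0, iv.2))]
    simp only [List.nil_append, List.map_map]
    have key : ∀ iv ∈ PySem.List.enumerate vars 0, 0 ≤ iv.1 ∧ iv.1 < (vars.length : Int) := by
      intro iv hiv
      rcases (PySem.List.mem_enumerate_iff vars 0 iv).mp hiv with ⟨k, hk, rfl⟩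
      refine ⟨by simp, by simp; omega⟩
    have hbits : ∀ iv : Int × Char, 0 ≤ iv.1 → iv.1 < (vars.length : Int) →
        (x :: vt).map (fun r => PySem.List.pyGetD (grayCodeToList r (vars.length : Int)) iv.1 0)
          = (x :: vt).map (fun y => grayBitB y ((vars.length : Int) - 1 - iv.1).toNat) := by
      intro iv h0 h1
      exact List.map_congr_left (fun r _ => grayGet_eq r _ iv.1 h0 h1)
    have hfil : (PySem.List.enumerate vars 0).filter
          (fun iv =>
            ((x :: vt).map (fun r => PySem.List.pyGetD (grayCodeToList r (vars.length : Int)) iv.1 0)).all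
              (fun b => b == PySem.List.pyGetD ((x :: vt).map (fun r => PySem.List.pyGetD (grayCodeToList r (vars.length : Int)) iv.1 0)) 0 0))
        = (PySem.List.enumerate vars 0).filter
          (fun iv =>
            (PySem.Set.ofList ((x :: vt).map (fun y => grayBitB y ((vars.length : Int) - 1 - iv.1).toNat))).length == 1) := by
      apply List.filter_congr
      intro iv hiv
      rcases key iv hiv with ⟨h0, h1⟩
      rw [hbits iv h0 h1]
      rw [List.map_cons, set_singleton_iff, PySem.List.pyGetD_zero_cons]
    rw [hfil]
    apply List.map_congr_left
    intro iv hiv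
    have hmem := List.mem_of_mem_filter hiv
    rcases key iv hmem with ⟨h0, h1⟩
    simp only [Function.comp, litChars, hbits iv h0 h1, List.map_cons, set_headD,
      PySem.List.pyGetD_zero_cons]
  · subst h
    rw [analyzeLoopA, litLoopB]
    simp [PySem.List.enumerate]

-- variables collected by B's loop come from vars
lemma litLoopB_snd_mem (vals : List Int) (vars : List Char) :
    ∀ p ∈ litLoopB vals vars, p.2 ∈ vars := by
  rw [litLoopB]
  rw [PySem.List.foldl_append_if
      (fun iv : Int × Char =>
        (PySem.Set.ofList (vals.map (fun y => grayBitB y ((vars.length : Int) - 1 - iv.1).toNat))).length == 1)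
      (fun iv : Int × Char =>
        ((PySem.Set.ofList (vals.map (fun y => grayBitB y ((vars.length : Int) - 1 - iv.1).toNat))).headD 0, iv.2))]
  intro p hp
  simp only [List.nil_append, List.mem_map] at hp
  rcases hp with ⟨iv, hiv, rfl⟩
  rcases (PySem.List.mem_enumerate_iff vars 0 iv).mp (List.mem_of_mem_filter hiv) with ⟨k, hk, rfl⟩
  exact List.getElem_mem hk

-- re-parsing the joined literal chunks recovers them
lemma parse_flatten (lits : List (Int × Char)) (h : ∀ p ∈ lits, p.2 ≠ '¬') :
    parseLits ((lits.map litChars).flatten) = lits.map litChars := by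
  induction lits with
  | nil => simp [parseLits]
  | cons bv t ih =>
    rcases List.forall_mem_cons.mp h with ⟨hv, ht⟩
    by_cases hb : bv.1 = 0
    · have hlc : litChars bv = ['¬', bv.2] := by simp [litChars, hb]
      simp only [List.map_cons, List.flatten_cons, hlc, List.cons_append, List.nil_append]
      rw [parseLits.eq_def]
      simp only []
      rw [if_pos trivial, ih ht]
    · have hlc : litChars bv = [bv.2] := by simp [litChars, hb]
      simp only [List.map_cons, List.flatten_cons, hlc, List.singleton_append]
      cases t with
      | nil =>
        rw [List.map_nil, List.flatten_nil]
        rw [parseLits.eq_def]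
        simp [hv]
      | cons p t' =>
        have hne : ∃ d rest, ((p :: t').map litChars).flatten = d :: rest := by
          by_cases hp : p.1 = 0 <;> simp [litChars, hp]
        rcases hne with ⟨d, rest, heq⟩
        rw [heq, parseLits.eq_def]
        simp only []
        rw [if_neg hv, ← heq, ih ht]

-- inverting a literal chunk gives B's clause literal
lemma invert_litChars (bv : Int × Char) (h : bv.2 ≠ '¬') :
    invertLit (litChars bv) = (if bv.1 ≠ 0 then '¬' :: [bv.2] else [bv.2]) := by
  by_cases hb : bv.1 = 0
  · have hlc : litChars bv = ['¬', bv.2] := by simp [litChars, hb]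
    rw [hlc, invertLit]
    simp [hb]
  · have hlc : litChars bv = [bv.2] := by simp [litChars, hb]
    rw [hlc, invertLit]
    simp [hb, Ne.symm h]

-- the per-group clause strings agree
lemma clause_eq (g : List (Int × Int)) (rv cv : List Char)
    (hrv : ∀ c ∈ rv, c ≠ '¬') (hcv : ∀ c ∈ cv, c ≠ '¬')
    (hg : g.length = 2)
    (hr : (g.getD 0 (0, 0)).1 ≤ (g.getD 1 (0, 0)).1 ∨ rv = [])
    (hc : (g.getD 0 (0, 0)).2 ≤ (g.getD 1 (0, 0)).2 ∨ cv = []) :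
    ('(' :: List.intercalate ['∨'] ((parseLits (analyze_kmap_group g rv cv)).map invertLit)) ++ [')']
      = ('(' :: List.intercalate ['∨']
          ((groupLiterals g rv cv).map (fun bv => if bv.1 ≠ 0 then '¬' :: [bv.2] else [bv.2]))) ++ [')'] := by
  obtain ⟨a, b, rfl⟩ : ∃ a b, g = [a, b] := by
    match g, hg with
    | [a, b], _ => exact ⟨a, b, rfl⟩
  obtain ⟨r1, c1⟩ := a
  obtain ⟨r2, c2⟩ := b
  simp only [List.getD_cons_zero, List.getD_cons_succ] at hr hc
  have hrows : PySem.List.sorted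
      (PySem.Set.ofList ((PySem.List.pyRange r1 (r2 + 1) 1).map (fun r => PySem.Int.mod r 4)))
      (fun x => x) false ≠ [] ∨ rv = [] := by
    rcases hr with hr | hr
    · left
      apply List.ne_nil_of_mem (a := PySem.Int.mod r1 4)
      rw [PySem.List.mem_sorted]
      rw [PySem.Set.mem_ofList]
      exact List.mem_map_of_mem (PySem.List.mem_pyRange_one.mpr ⟨le_refl r1, by omega⟩)
    · right; exact hr
  have hcols : PySem.List.sorted
      (PySem.Set.ofList ((PySem.List.pyRange c1 (c2 + 1) 1).map (fun c => PySem.Int.mod c 4)))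
      (fun x => x) false ≠ [] ∨ cv = [] := by
    rcases hc with hc | hc
    · left
      apply List.ne_nil_of_mem (a := PySem.Int.mod c1 4)
      rw [PySem.List.mem_sorted]
      rw [PySem.Set.mem_ofList]
      exact List.mem_map_of_mem (PySem.List.mem_pyRange_one.mpr ⟨le_refl c1, by omega⟩)
    · right; exact hc
  rw [analyze_kmap_group, groupLiterals]
  rw [side_eq _ _ hrows, side_eq _ _ hcols, ← List.map_append]
  have hsnd : ∀ p ∈ litLoopB (PySem.List.sorted
        (PySem.Set.ofList ((PySem.List.pyRange r1 (r2 + 1) 1).map (fun r => PySem.Int.mod r 4)))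
        (fun x => x) false) rv ++ litLoopB (PySem.List.sorted
        (PySem.Set.ofList ((PySem.List.pyRange c1 (c2 + 1) 1).map (fun c => PySem.Int.mod c 4)))
        (fun x => x) false) cv, p.2 ≠ '¬' := by
    intro p hp
    rcases List.mem_append.mp hp with hp | hp
    · exact hrv _ (litLoopB_snd_mem _ _ p hp)
    · exact hcv _ (litLoopB_snd_mem _ _ p hp)
  rw [parse_flatten _ hsnd]
  congr 2
  rw [List.map_map]
  exact congrArg _ (List.map_congr_left (fun p hp => invert_litChars p (hsnd p hp)))

-- ===== VERDICT (by name: the statement is the Claim_ definition above) =====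
theorem get_minimal_knf_spec : Claim_equal_get_minimal_knf := by
  intro groups rv cv hdom hpre
  rcases hpre with ⟨hne, hpre⟩
  unfold Spec_get_minimal_knf get_minimal_knf get_minimal_knf_alt
  simp only []
  rw [PySem.List.foldl_append_singleton_eq_map
      (fun term => ('(' :: List.intercalate ['∨'] ((parseLits term).map invertLit)) ++ [')'])]
  rw [PySem.List.foldl_append_singleton_eq_map
      (fun g => ('(' :: List.intercalate ['∨']
        ((groupLiterals g rv.toList cv.toList).map
          (fun bv => if bv.1 ≠ 0 then '¬' :: [bv.2] else [bv.2]))) ++ [')'])]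
  simp only [List.nil_append, List.map_map]
  have hdomc : (∀ c ∈ rv.toList, c ≠ '¬') ∧ (∀ c ∈ cv.toList, c ≠ '¬') := by
    unfold Dom_get_minimal_knf at hdom
    simp only [Bool.and_eq_true, pvDomStr, List.all_eq_true] at hdom
    refine ⟨fun c hcm => ?_, fun c hcm => ?_⟩
    · intro hceq; subst hceq; exact absurd (hdom.1.2 _ hcm) (by decide)
    · intro hceq; subst hceq; exact absurd (hdom.2 _ hcm) (by decide)
  have hmap : groups.map
        ((fun term => ('(' :: List.intercalate ['∨'] ((parseLits term).map invertLit)) ++ [')']) ∘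
          (fun g => analyze_kmap_group g rv.toList cv.toList))
      = groups.map (fun g => ('(' :: List.intercalate ['∨']
          ((groupLiterals g rv.toList cv.toList).map
            (fun bv => if bv.1 ≠ 0 then '¬' :: [bv.2] else [bv.2]))) ++ [')']) := by
    apply List.map_congr_left
    intro g hgm
    rcases hpre g hgm with ⟨hg2, hr, hc⟩
    have hr' : (g.getD 0 (0, 0)).1 ≤ (g.getD 1 (0, 0)).1 ∨ rv.toList = [] := by
      rcases hr with hr | hr
      · exact Or.inl hr
      · exact Or.inr (by rw [hr]; rfl)
    have hc' : (g.getD 0 (0, 0)).2 ≤ (g.getD 1 (0, 0)).2 ∨ cv.toList = [] := by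
      rcases hc with hc | hc
      · exact Or.inl hc
      · exact Or.inr (by rw [hc]; rfl)
    exact clause_eq g rv.toList cv.toList hdomc.1 hdomc.2 hg2 hr' hc'
  rw [hmap]
  cases groups with
  | nil => exact absurd rfl hne
  | cons g0 gt =>
    cases gt with
    | nil => simp [PySem.List.pyGetD_zero_cons]
    | cons g1 gt' => simp
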